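-- pv_equiv track=rewrite | github.com/alako/Pooling | stage1.py | filter_edges_in_cycles
-- ===== SOURCE A (Python) =====
-- def filter_edges_in_cycles(edges, cycles):
--     edges_in_cycles = []
--     for (u, v, w) in edges:
--         in_cycle = False
--         for cycle in cycles:
--             if u in cycle and v in cycle:
--                 in_cycle = True
--         if in_cycle:
--             edges_in_cycles.append((u, v, w))
--     return edges_in_cycles
-- ===== SOURCE B (Python) =====
-- def filter_edges_in_cycles(edges, cycles):
--     node_to_cycles = {}
--     for i, cycle in enumerate(cycles):
--         for node in cycle:
--             node_to_cycles.setdefault(node, set()).add(i)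
--     empty = set()
--     result = []
--     for (u, v, w) in edges:
--         if node_to_cycles.get(u, empty) & node_to_cycles.get(v, empty):
--             result.append((u, v, w))
--     return result
-- ===== Notes on version B (the rewrite author's own statement) =====
-- stated objective: faster
-- what changed: Replaced the per-edge rescan of every cycle with an inverted index (node -> set of cycle ids) built once, so each edge is decided by one set intersection instead of a loop over all cycles.
import Mathlib
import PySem

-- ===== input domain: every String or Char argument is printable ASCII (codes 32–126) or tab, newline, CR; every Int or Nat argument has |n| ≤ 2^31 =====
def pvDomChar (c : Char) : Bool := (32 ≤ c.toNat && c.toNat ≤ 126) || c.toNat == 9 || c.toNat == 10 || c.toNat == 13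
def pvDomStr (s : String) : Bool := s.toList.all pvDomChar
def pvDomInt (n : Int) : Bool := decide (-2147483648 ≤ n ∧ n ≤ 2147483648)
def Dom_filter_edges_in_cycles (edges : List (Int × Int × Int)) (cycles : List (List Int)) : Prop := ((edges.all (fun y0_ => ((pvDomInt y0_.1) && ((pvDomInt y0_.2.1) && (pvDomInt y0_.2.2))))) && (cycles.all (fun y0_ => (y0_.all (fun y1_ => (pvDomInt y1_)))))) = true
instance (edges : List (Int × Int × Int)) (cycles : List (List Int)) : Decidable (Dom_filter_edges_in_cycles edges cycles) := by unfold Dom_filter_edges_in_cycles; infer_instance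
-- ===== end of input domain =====

-- B replaces A's per-edge rescan of all cycles by an inverted index (node -> set of cycle ids)
-- built once, then one set intersection per edge (objective: faster).

-- ===== PORT A =====
def filter_edges_in_cycles (edges : List (Int × Int × Int)) (cycles : List (List Int)) : List (Int × Int × Int) :=
  edges.foldl (fun acc e =>
    let in_cycle := cycles.foldl (fun b cycle =>
      if cycle.contains e.1 && cycle.contains e.2.1 then true else b) false
    if in_cycle then acc ++ [(e.1, e.2.1, e.2.2)] else acc) []

-- ===== PORT B =====
-- node_to_cycles: one pass over enumerate(cycles), setdefault(node, set()).add(i)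
def pvIndex (cycles : List (List Int)) : PySem.Dict Int (PySem.Set Int) :=
  (PySem.List.enumerate cycles).foldl (fun d p =>
    p.2.foldl (fun d node =>
      d.insert node (PySem.Set.add (d.getD node PySem.Set.empty) p.1)) d) PySem.Dict.empty

def filter_edges_in_cycles_alt (edges : List (Int × Int × Int)) (cycles : List (List Int)) : List (Int × Int × Int) :=
  let idx := pvIndex cycles
  edges.foldl (fun res e =>
    if !(PySem.Set.inter (idx.getD e.1 PySem.Set.empty) (idx.getD e.2.1 PySem.Set.empty)).isEmpty
    then res ++ [(e.1, e.2.1, e.2.2)] else res) []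

-- ===== PRECONDITION & SPEC =====
def Spec_filter_edges_in_cycles (edges : List (Int × Int × Int)) (cycles : List (List Int)) (out : List (Int × Int × Int)) : Prop := out = filter_edges_in_cycles_alt edges cycles
instance (edges : List (Int × Int × Int)) (cycles : List (List Int)) (out : List (Int × Int × Int)) : Decidable (Spec_filter_edges_in_cycles edges cycles out) := by unfold Spec_filter_edges_in_cycles; infer_instance

-- ===== CLAIM (what is proved, stated in full; the proofs are below) =====
def Claim_equal_filter_edges_in_cycles : Prop := ∀ (edges : List (Int × Int × Int)) (cycles : List (List Int)), Dom_filter_edges_in_cycles edges cycles → Spec_filter_edges_in_cycles edges cycles (filter_edges_in_cycles edges cycles)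

-- ===== LEMMAS AND PROOFS =====

-- A's inner flag loop is List.any
theorem pv_inner_any (cycles : List (List Int)) (p : List Int → Bool) (b : Bool) :
    cycles.foldl (fun b c => if p c then true else b) b = (b || cycles.any p) := by
  induction cycles generalizing b with
  | nil => simp
  | cons c cs ih =>
    simp only [List.foldl_cons, List.any_cons, ih]
    by_cases h : p c = true <;> simp [h]

-- membership in the index after one cycle's inner loop
theorem pv_mem_inner (c : List Int) (d : PySem.Dict Int (PySem.Set Int)) (j i node : Int) :
    i ∈ (c.foldl (fun d node =>
          d.insert node (PySem.Set.add (d.getD node PySem.Set.empty) j)) d).getD node PySem.Set.empty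
      ↔ i ∈ d.getD node PySem.Set.empty ∨ (i = j ∧ node ∈ c) := by
  induction c generalizing d with
  | nil => simp
  | cons x xs ih =>
    simp only [List.foldl_cons, ih, PySem.Dict.getD_insert]
    by_cases h : node = x
    · subst h
      simp [PySem.Set.mem_add]
      tauto
    · simp [h]

-- membership in the index built from a list of (id, cycle) pairs
theorem pv_mem_build (ps : List (Int × List Int)) (d : PySem.Dict Int (PySem.Set Int)) (i node : Int) :
    i ∈ (ps.foldl (fun d p =>
          p.2.foldl (fun d node =>
            d.insert node (PySem.Set.add (d.getD node PySem.Set.empty) p.1)) d) d).getD node PySem.Set.empty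
      ↔ i ∈ d.getD node PySem.Set.empty ∨ ∃ p ∈ ps, p.1 = i ∧ node ∈ p.2 := by
  induction ps generalizing d with
  | nil => simp
  | cons p ps ih =>
    simp only [List.foldl_cons, ih, pv_mem_inner, List.mem_cons]
    constructor
    · rintro (⟨h | ⟨rfl, hm⟩⟩ | ⟨q, hq, h1, h2⟩)
      · exact Or.inl h
      · exact Or.inr ⟨p, Or.inl rfl, rfl, hm⟩
      · exact Or.inr ⟨q, Or.inr hq, h1, h2⟩
    · rintro (h | ⟨q, hq | hq, h1, h2⟩)
      · exact Or.inl (Or.inl h)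
      · subst hq; exact Or.inl (Or.inr ⟨h1.symm, h2⟩)
      · exact Or.inr ⟨q, hq, h1, h2⟩

-- membership in enumerate
theorem pv_mem_enumerate {α : Type} (xs : List α) (s : Int) (p : Int × α) :
    p ∈ PySem.List.enumerate xs s ↔ ∃ k : Nat, ∃ h : k < xs.length, p = (s + k, xs[k]) := by
  induction xs generalizing s with
  | nil => simp [PySem.List.enumerate_nil]
  | cons x xs ih =>
    simp only [PySem.List.enumerate_cons, List.mem_cons, ih]
    constructor
    · rintro (rfl | ⟨k, hk, rfl⟩)
      · exact ⟨0, by simp, by simp⟩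
      · exact ⟨k + 1, by simpa using hk, by push_cast; simp [add_comm, add_left_comm]⟩
    · rintro ⟨k, hk, rfl⟩
      cases k with
      | zero => exact Or.inl (by simp)
      | succ k => exact Or.inr ⟨k, by simpa using hk, by push_cast; simp [add_comm, add_left_comm]⟩

-- characterisation of the inverted index
theorem pv_mem_index (cycles : List (List Int)) (i node : Int) :
    i ∈ (pvIndex cycles).getD node PySem.Set.empty
      ↔ ∃ k : Nat, ∃ h : k < cycles.length, (i : Int) = k ∧ node ∈ cycles[k] := by
  unfold pvIndex
  rw [pv_mem_build]
  simp only [PySem.Dict.getD_empty]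
  constructor
  · rintro (h | ⟨p, hp, h1, h2⟩)
    · simp [PySem.Set.empty] at h
    · rw [pv_mem_enumerate] at hp
      obtain ⟨k, hk, rfl⟩ := hp
      exact ⟨k, hk, by simpa using h1.symm, h2⟩
  · rintro ⟨k, hk, rfl, h2⟩
    refine Or.inr ⟨((k : Int), cycles[k]), ?_, by simp, h2⟩
    rw [pv_mem_enumerate]
    exact ⟨k, hk, by simp⟩

-- the two per-edge tests agree
theorem pv_test_eq (cycles : List (List Int)) (u v : Int) :
    (!(PySem.Set.inter ((pvIndex cycles).getD u PySem.Set.empty)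
        ((pvIndex cycles).getD v PySem.Set.empty)).isEmpty)
      = cycles.any (fun c => c.contains u && c.contains v) := by
  rw [Bool.eq_iff_iff, Bool.not_eq_true', List.isEmpty_eq_false_iff_exists_mem, List.any_eq_true]
  constructor
  · rintro ⟨i, hi⟩
    rw [PySem.Set.mem_inter, pv_mem_index, pv_mem_index] at hi
    obtain ⟨⟨k, hk, hik, hu⟩, ⟨k', hk', hik', hv⟩⟩ := hi
    have hkk : k' = k := by exact_mod_cast hik'.symm.trans hik
    subst hkk
    exact ⟨_, List.getElem_mem hk, by simp [hu, hv]⟩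
  · rintro ⟨c, hc, hcv⟩
    simp only [Bool.and_eq_true, List.contains_eq_mem, decide_eq_true_eq] at hcv
    obtain ⟨k, hk, rfl⟩ := List.getElem_of_mem hc
    refine ⟨(k : Int), ?_⟩
    rw [PySem.Set.mem_inter, pv_mem_index, pv_mem_index]
    exact ⟨⟨k, hk, rfl, hcv.1⟩, ⟨k, hk, rfl, hcv.2⟩⟩

-- ===== VERDICT (by name: the statement is the Claim_ definition above) =====
theorem filter_edges_in_cycles_spec : Claim_equal_filter_edges_in_cycles := by
  intro edges cycles _
  unfold Spec_filter_edges_in_cycles filter_edges_in_cycles filter_edges_in_cycles_alt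
  simp only [pv_inner_any, Bool.false_or]
  rw [PySem.List.foldl_append_if (fun e => cycles.any fun c => c.contains e.1 && c.contains e.2.1)
      (fun e => (e.1, e.2.1, e.2.2)) edges []]
  rw [PySem.List.foldl_append_if (fun e => !(PySem.Set.inter ((pvIndex cycles).getD e.1 PySem.Set.empty) ((pvIndex cycles).getD e.2.1 PySem.Set.empty)).isEmpty)
      (fun e => (e.1, e.2.1, e.2.2)) edges []]
  simp only [pv_test_eq]
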